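-- pv_equiv track=rewrite | github.com/jdabrante/1-DAW | Programacion/ut4/REPASO/ut4/consecutive_seq.py | consecutive_seq
-- ===== SOURCE A (Python) =====
-- def consecutive_seq(items: list, tager_count: int, count: int = 1):
--     if count == tager_count:
--         return items[0]
--     if len(items) == 1:
--         return 0
--     if items[0] == items[1]:
--         count += 1
--         return consecutive_seq(items[1:],tager_count,count)
--     else:
--         count = 1
--         return consecutive_seq(items[1:],tager_count,count)
-- ===== SOURCE B (Python) =====
-- def consecutive_seq(items: list, tager_count: int, count: int = 1):
--     c = count
--     n = len(items)
--     for i in range(n):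
--         if c == tager_count:
--             return items[i]
--         if i == n - 1:
--             return 0
--         c = c + 1 if items[i] == items[i + 1] else 1
-- ===== Notes on version B (the rewrite author's own statement) =====
-- stated objective: faster
-- what changed: Replaces the recursion that copies the list by slicing items[1:] at every step with a single index-based loop over the list, tracking the running count in a local variable.
import Mathlib
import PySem

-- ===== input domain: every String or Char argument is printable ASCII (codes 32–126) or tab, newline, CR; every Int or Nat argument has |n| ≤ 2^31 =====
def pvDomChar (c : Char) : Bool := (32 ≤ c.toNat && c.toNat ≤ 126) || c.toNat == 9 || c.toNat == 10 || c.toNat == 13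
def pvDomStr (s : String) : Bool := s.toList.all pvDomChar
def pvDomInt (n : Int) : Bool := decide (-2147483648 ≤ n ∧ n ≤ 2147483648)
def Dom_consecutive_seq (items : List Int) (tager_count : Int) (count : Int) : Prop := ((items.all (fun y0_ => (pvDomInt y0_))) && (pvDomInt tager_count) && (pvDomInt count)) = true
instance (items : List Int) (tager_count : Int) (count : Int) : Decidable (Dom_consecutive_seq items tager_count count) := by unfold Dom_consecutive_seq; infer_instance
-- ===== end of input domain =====

-- B replaces A's recursion (which copies the list by slicing items[1:] each step) with one
-- index-based loop tracking the running count; equivalence of return values on nonempty lists.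

-- ===== PORT A =====
-- literal transliteration of A's recursion; the [] branch is Python's IndexError, excluded by Pre_
def consecutive_seq (items : List Int) (tager_count : Int) (count : Int) : Int :=
  if count = tager_count then items.headD 0           -- items[0]; raises on [] in Python
  else match items with
  | [] => 0                                           -- Python raises IndexError here (outside Pre_)
  | [_] => 0                                          -- len(items) == 1
  | a :: b :: rest =>
    if a = b then consecutive_seq (b :: rest) tager_count (count + 1)
    else consecutive_seq (b :: rest) tager_count 1

-- ===== PORT B =====
-- the 'for i in range(n)' loop of Source B; falls off the loop (Python: None) only when n = 0
def consecutive_seq_altLoop (items : List Int) (tager_count : Int) (n i : Nat) (c : Int) : Int :=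
  if _h : i < n then
    if c = tager_count then PySem.List.pyGetD items (i : Int) 0
    else if i = n - 1 then 0
    else consecutive_seq_altLoop items tager_count n (i + 1)
      (if PySem.List.pyGetD items (i : Int) 0 = PySem.List.pyGetD items ((i : Int) + 1) 0 then c + 1 else 1)
  else 0
termination_by n - i

def consecutive_seq_alt (items : List Int) (tager_count : Int) (count : Int) : Int :=
  consecutive_seq_altLoop items tager_count items.length 0 count

-- ===== PRECONDITION & SPEC =====
-- Pre_ excludes only the empty list, on which Python A raises IndexError (items[0]).
def Pre_consecutive_seq (items : List Int) (tager_count : Int) (count : Int) : Prop := items ≠ []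
instance (items : List Int) (tager_count : Int) (count : Int) : Decidable (Pre_consecutive_seq items tager_count count) := by unfold Pre_consecutive_seq; infer_instance
def pvWitness_consecutive_seq : List Int × Int × Int := ([1, 1, 2], 2, 1)

def Spec_consecutive_seq (items : List Int) (tager_count : Int) (count : Int) (out : Int) : Prop := out = consecutive_seq_alt items tager_count count
instance (items : List Int) (tager_count : Int) (count : Int) (out : Int) : Decidable (Spec_consecutive_seq items tager_count count out) := by unfold Spec_consecutive_seq; infer_instance

-- ===== CLAIM (what is proved, stated in full; the proofs are below) =====
def Claim_equal_consecutive_seq : Prop := ∀ (items : List Int) (tager_count : Int) (count : Int), Dom_consecutive_seq items tager_count count → Pre_consecutive_seq items tager_count count → Spec_consecutive_seq items tager_count count (consecutive_seq items tager_count count)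

-- ===== LEMMAS AND PROOFS =====

lemma consecutive_seq_altLoop_eq (items : List Int) (t : Int) :
    ∀ (k i : Nat) (c : Int), items.length - i = k → i < items.length →
      consecutive_seq_altLoop items t items.length i c = consecutive_seq (items.drop i) t c := by
  intro k
  induction k with
  | zero => intro i c hk hi; omega
  | succ k ih =>
    intro i c hk hi
    have hdrop : items.drop i = items[i] :: items.drop (i + 1) :=
      List.drop_eq_getElem_cons hi
    rw [consecutive_seq_altLoop]
    simp only [hi, dif_pos]
    by_cases hc : c = t
    · -- both return items[i]
      rw [if_pos hc, hdrop, consecutive_seq.eq_def, if_pos hc]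
      simp [PySem.List.pyGetD_natCast, List.getD_eq_getElem?_getD, hi]
    · rw [if_neg hc]
      by_cases hlast : i = items.length - 1
      · -- last index: drop i is a singleton, A returns 0
        rw [if_pos hlast]
        have h1 : items.drop (i + 1) = [] := by
          apply List.drop_eq_nil_of_le; omega
        rw [hdrop, h1, consecutive_seq.eq_def, if_neg hc]
      · rw [if_neg hlast]
        have hi1 : i + 1 < items.length := by omega
        have hdrop1 : items.drop (i + 1) = items[i + 1] :: items.drop (i + 2) :=
          List.drop_eq_getElem_cons hi1
        rw [ih (i + 1) _ (by omega) hi1, hdrop, hdrop1]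
        conv_rhs => rw [consecutive_seq.eq_def]
        rw [if_neg hc]
        have hg : PySem.List.pyGetD items (i : Int) 0 = items[i] := by
          simp [PySem.List.pyGetD_natCast, List.getD_eq_getElem?_getD, hi]
        have hg1 : PySem.List.pyGetD items ((i : Int) + 1) 0 = items[i + 1] := by
          have : ((i : Int) + 1) = ((i + 1 : Nat) : Int) := by omega
          rw [this, PySem.List.pyGetD_natCast]
          simp [List.getD_eq_getElem?_getD, hi1]
        rw [hg, hg1]
        by_cases he : items[i] = items[i + 1]
        · simp [he]
        · simp [he]

-- ===== VERDICT (by name: the statement is the Claim_ definition above) =====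
theorem consecutive_seq_spec : Claim_equal_consecutive_seq := by
  intro items t c _hdom hpre
  unfold Spec_consecutive_seq consecutive_seq_alt
  have hlen : 0 < items.length := List.length_pos_iff.mpr hpre
  rw [consecutive_seq_altLoop_eq items t (items.length - 0) 0 c rfl hlen, List.drop_zero]
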